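-- pv_equiv track=rewrite | github.com/KU-MedAI/VariantCellBench | PLMs/embedding.py | _find_column_for_master_pos
-- ===== SOURCE A (Python) =====
-- def _find_column_for_master_pos(aligned_master: str, pos_1based: int) -> int:
--     """
--     Find alignment column corresponding to a residue position
--     in the master sequence (ignoring gaps).
--     """
--
--     cnt = 0
--
--     for col, ch in enumerate(aligned_master):
--
--         if ch != "-":
--             cnt += 1
--
--             if cnt == pos_1based:
--                 return col
--
--     raise IndexError(f"Master position {pos_1based} not found.")
-- ===== SOURCE B (Python) =====
-- def _find_column_for_master_pos(aligned_master: str, pos_1based: int) -> int: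
--     cols = [i for i, ch in enumerate(aligned_master) if ch != "-"]
--     if 1 <= pos_1based <= len(cols):
--         return cols[pos_1based - 1]
--     raise IndexError(f"Master position {pos_1based} not found.")
-- ===== Notes on version B (the rewrite author's own statement) =====
-- stated objective: simpler
-- what changed: Replaces the early-terminating counting scan with building the full table of non-gap column indices once and then a bounds check plus direct indexing cols[pos_1based-1].
import Mathlib
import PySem

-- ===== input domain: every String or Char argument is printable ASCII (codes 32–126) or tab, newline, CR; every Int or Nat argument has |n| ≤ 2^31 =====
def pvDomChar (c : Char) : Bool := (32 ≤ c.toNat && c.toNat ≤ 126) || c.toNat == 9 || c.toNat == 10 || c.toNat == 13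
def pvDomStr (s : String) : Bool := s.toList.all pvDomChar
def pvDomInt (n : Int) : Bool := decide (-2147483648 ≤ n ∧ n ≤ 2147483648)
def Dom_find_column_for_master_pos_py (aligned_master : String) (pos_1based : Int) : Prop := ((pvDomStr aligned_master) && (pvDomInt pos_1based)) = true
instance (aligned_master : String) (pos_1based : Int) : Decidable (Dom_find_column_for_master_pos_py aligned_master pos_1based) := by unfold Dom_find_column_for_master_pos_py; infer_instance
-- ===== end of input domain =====

-- B changes the structure only: it builds the table of non-gap column indices once and indexes it; equivalence is on the return value, on inputs where A does not raise.

-- ===== PORT A =====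
-- counting scan: col is the enumerate index, cnt the number of non-gap chars seen; returns none where Python raises IndexError
def pvGoA : List Char → Int → Int → Int → Option Int
  | [], _, _, _ => none
  | c :: cs, col, cnt, pos =>
      if c ≠ '-' then
        if cnt + 1 = pos then some col
        else pvGoA cs (col + 1) (cnt + 1) pos
      else pvGoA cs (col + 1) cnt pos

def find_column_for_master_pos_py (aligned_master : String) (pos_1based : Int) : Int :=
  (pvGoA aligned_master.toList 0 0 pos_1based).getD 0

-- ===== PORT B =====
-- [i for i, ch in enumerate(aligned_master) if ch != '-']
def pvColsB : List Char → Int → List Int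
  | [], _ => []
  | c :: cs, i => if c ≠ '-' then i :: pvColsB cs (i + 1) else pvColsB cs (i + 1)

def find_column_for_master_pos_py_alt (aligned_master : String) (pos_1based : Int) : Int :=
  let cols := pvColsB aligned_master.toList 0
  if 1 ≤ pos_1based ∧ pos_1based ≤ cols.length then
    (PySem.List.pyGet? cols (pos_1based - 1)).getD 0
  else 0  -- Python raises IndexError here; excluded by Pre_

-- ===== PRECONDITION & SPEC =====
-- Pre_ excludes exactly the inputs where Python A raises IndexError: pos_1based must be
-- between 1 and the number of non-gap characters of aligned_master.
def Pre_find_column_for_master_pos_py (aligned_master : String) (pos_1based : Int) : Prop :=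
  1 ≤ pos_1based ∧ pos_1based ≤ (aligned_master.toList.filter (· ≠ '-')).length
instance (aligned_master : String) (pos_1based : Int) : Decidable (Pre_find_column_for_master_pos_py aligned_master pos_1based) := by unfold Pre_find_column_for_master_pos_py; infer_instance

def pvWitness_find_column_for_master_pos_py : String × Int := ("A-BC", 2)

def Spec_find_column_for_master_pos_py (aligned_master : String) (pos_1based : Int) (out : Int) : Prop := out = find_column_for_master_pos_py_alt aligned_master pos_1based
instance (aligned_master : String) (pos_1based : Int) (out : Int) : Decidable (Spec_find_column_for_master_pos_py aligned_master pos_1based out) := by unfold Spec_find_column_for_master_pos_py; infer_instance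

-- ===== CLAIM (what is proved, stated in full; the proofs are below) =====
def Claim_equal_find_column_for_master_pos_py : Prop := ∀ (aligned_master : String) (pos_1based : Int), Dom_find_column_for_master_pos_py aligned_master pos_1based → Pre_find_column_for_master_pos_py aligned_master pos_1based → Spec_find_column_for_master_pos_py aligned_master pos_1based (find_column_for_master_pos_py aligned_master pos_1based)

-- ===== LEMMAS AND PROOFS =====

theorem pvColsB_length (cs : List Char) (i : Int) :
    (pvColsB cs i).length = (cs.filter (· ≠ '-')).length := by
  induction cs generalizing i with
  | nil => rfl
  | cons c cs ih =>
      simp only [pvColsB, List.filter]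
      by_cases h : c = '-' <;> simp [h, ih]

theorem pvGoA_eq_get (cs : List Char) (col cnt pos : Int) (h : cnt < pos) :
    pvGoA cs col cnt pos = (pvColsB cs col)[(pos - cnt - 1).toNat]? := by
  induction cs generalizing col cnt with
  | nil => simp [pvGoA, pvColsB]
  | cons c cs ih =>
      simp only [pvGoA, pvColsB]
      by_cases hc : c = '-'
      · rw [if_neg (by simp [hc]), if_neg (by simp [hc])]
        exact ih (col + 1) cnt h
      · rw [if_pos hc, if_pos hc]
        by_cases he : cnt + 1 = pos
        · have h0 : (pos - cnt - 1).toNat = 0 := by omega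
          rw [if_pos he, h0]
          simp
        · rw [if_neg he, ih (col + 1) (cnt + 1) (by omega)]
          have h2 : (pos - cnt - 1).toNat = (pos - (cnt + 1) - 1).toNat + 1 := by omega
          rw [h2]
          simp

-- ===== VERDICT (by name: the statement is the Claim_ definition above) =====
theorem find_column_for_master_pos_py_spec : Claim_equal_find_column_for_master_pos_py := by
  intro s pos _ hpre
  obtain ⟨h1, h2⟩ := hpre
  unfold Spec_find_column_for_master_pos_py find_column_for_master_pos_py find_column_for_master_pos_py_alt
  have hlen : (pvColsB s.toList 0).length = (s.toList.filter (· ≠ '-')).length :=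
    pvColsB_length s.toList 0
  rw [pvGoA_eq_get s.toList 0 0 pos (by omega)]
  have hif : (1 ≤ pos ∧ pos ≤ ((pvColsB s.toList 0).length : Int)) := by
    constructor
    · exact h1
    · rw [hlen]; exact h2
  rw [if_pos hif]
  rw [PySem.List.pyGet?_of_nonneg (h := by omega)]
  norm_num
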